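-- pv_equiv track=rewrite | github.com/RLTree/ArcadiaCoach | backend/app/curriculum_sequencer.py | _slugify_category
-- ===== SOURCE A (Python) =====
-- from typing import Any, Dict, Iterable, List, Literal, Optional, Sequence, Set, Tuple
--
-- def _slugify_category(value: Optional[str]) -> str:
--     if not value:
--         return ""
--     slug_chars: List[str] = []
--     for char in value:
--         if char.isalnum():
--             slug_chars.append(char.lower())
--         elif char in {" ", "-", "_", "/"}:
--             slug_chars.append("-")
--     slug = "".join(slug_chars).strip("-")
--     while "--" in slug:
--         slug = slug.replace("--", "-")
--     return slug
-- ===== SOURCE B (Python) =====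
-- def _slugify_category(value):
--     if not value:
--         return ""
--     out = []
--     prev = "-"  # sentinel: acts like "already a dash", so no leading dash is emitted
--     for ch in value:
--         if ch.isalnum():
--             prev = ch.lower()
--             out.append(prev)
--         elif ch in {" ", "-", "_", "/"} and prev != "-":
--             prev = "-"
--             out.append("-")
--     if prev == "-" and out:
--         out.pop()
--     return "".join(out)
-- ===== Notes on version B (the rewrite author's own statement) =====
-- stated objective: simpler
-- what changed: Instead of collecting mapped characters and then post-processing with a dash strip plus a repeated global doubled-dash replace loop until a fixpoint, B emits the slug in a single pass that tracks the previously emitted character so it never writes a leading or doubled dash, and pops at most one trailing dash at the end.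
import Mathlib
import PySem

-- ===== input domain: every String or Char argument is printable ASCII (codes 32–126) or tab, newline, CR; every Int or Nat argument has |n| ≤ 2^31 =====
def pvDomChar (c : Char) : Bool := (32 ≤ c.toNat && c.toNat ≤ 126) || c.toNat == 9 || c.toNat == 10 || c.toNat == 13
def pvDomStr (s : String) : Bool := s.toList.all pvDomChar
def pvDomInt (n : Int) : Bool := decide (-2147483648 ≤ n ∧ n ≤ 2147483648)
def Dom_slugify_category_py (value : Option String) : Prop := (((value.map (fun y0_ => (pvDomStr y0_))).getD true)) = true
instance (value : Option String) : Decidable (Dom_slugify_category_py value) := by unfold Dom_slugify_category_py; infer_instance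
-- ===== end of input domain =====

-- B replaces A's repeated global '--'→'-' replace loop by a single pass that never
-- emits a doubled or leading dash (objective: simpler one-pass algorithm).

-- ===== PORT A =====
-- the `while "--" in slug: slug = slug.replace("--", "-")` loop; fuel = slug.length always suffices
def pvSlugLoop : Nat → List Char → List Char
  | 0, s => s
  | fuel+1, s =>
      if PySem.Chars.isIn ['-', '-'] s then
        pvSlugLoop fuel (PySem.Chars.replace s ['-', '-'] ['-'])
      else s

def slugify_category_py (value : Option String) : String :=
  match value with
  | none => ""
  | some s =>
    if s.toList.isEmpty then "" else
      let chars := s.toList.foldl (fun acc c =>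
        if PySem.Chars.isalnum c then acc ++ [PySem.Chars.lowerChar c]
        else if [' ', '-', '_', '/'].contains c then acc ++ ['-']
        else acc) []
      let slug := PySem.Chars.stripChars chars ['-']
      String.ofList (pvSlugLoop slug.length slug)

-- ===== PORT B =====
def slugify_category_py_alt (value : Option String) : String :=
  match value with
  | none => ""
  | some s =>
    if s.toList.isEmpty then "" else
      let st := s.toList.foldl (fun (p : List Char × Char) c =>
        if PySem.Chars.isalnum c then (p.1 ++ [PySem.Chars.lowerChar c], PySem.Chars.lowerChar c)
        else if [' ', '-', '_', '/'].contains c && p.2 != '-' then (p.1 ++ ['-'], '-')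
        else p) ([], '-')
      String.ofList (if st.2 = '-' ∧ st.1 ≠ [] then st.1.dropLast else st.1)

-- ===== PRECONDITION & SPEC =====
def Spec_slugify_category_py (value : Option String) (out : String) : Prop := out = slugify_category_py_alt value
instance (value : Option String) (out : String) : Decidable (Spec_slugify_category_py value out) := by unfold Spec_slugify_category_py; infer_instance

-- ===== CLAIM (what is proved, stated in full; the proofs are below) =====
def Claim_equal_slugify_category_py : Prop := ∀ (value : Option String), Dom_slugify_category_py value → Spec_slugify_category_py value (slugify_category_py value)

-- ===== LEMMAS AND PROOFS =====

-- per-char classification shared by both loops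
def pvClassify (c : Char) : Option Char :=
  if PySem.Chars.isalnum c then some (PySem.Chars.lowerChar c)
  else if [' ', '-', '_', '/'].contains c then some '-'
  else none

-- what B's single pass appends, over the classified char list (pd = "previous emitted char is a dash / start")
def pvBody : Bool → List Char → List Char
  | _, [] => []
  | pd, c :: t => if c = '-' then (if pd then pvBody true t else '-' :: pvBody true t) else c :: pvBody false t

-- whether the last emitted char is a dash after the pass
def pvPA : Bool → List Char → Bool
  | pd, [] => pd
  | _, c :: t => pvPA (c = '-') t

-- collapse every run of dashes to a single dash (the fixpoint of A's while loop)
def pvCol : List Char → List Char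
  | [] => []
  | [c] => [c]
  | c1 :: c2 :: t => if c1 = '-' ∧ c2 = '-' then pvCol (c2 :: t) else c1 :: pvCol (c2 :: t)

-- one pass of s.replace("--", "-")
def pvRep : List Char → List Char
  | [] => []
  | [c] => [c]
  | c1 :: c2 :: t => if c1 = '-' ∧ c2 = '-' then '-' :: pvRep t else c1 :: pvRep (c2 :: t)

theorem pv_lower_ne_dash (c : Char) (h : PySem.Chars.isalnum c = true) :
    PySem.Chars.lowerChar c ≠ '-' := by
  unfold PySem.Chars.isalnum PySem.Chars.isalpha PySem.Chars.isdigit PySem.Chars.isupper PySem.Chars.islower at h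
  unfold PySem.Chars.lowerChar PySem.Chars.isupper
  intro hE
  split at hE
  · next hu =>
    simp only [Bool.and_eq_true, decide_eq_true_eq] at hu
    have h1 : c.toNat ≤ 90 := by exact_mod_cast hu.2
    have h3 : 65 ≤ c.toNat := by exact_mod_cast hu.1
    have hv : (c.toNat + 32).isValidChar := Or.inl (by omega)
    have h2 : (Char.ofNat (c.toNat + 32)).toNat = c.toNat + 32 := by
      rw [Char.toNat_ofNat, if_pos hv]
    rw [hE] at h2
    have h4 : ('-').toNat = 45 := by decide
    omega
  · subst hE
    exact absurd h (by decide)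

theorem pv_foldA (l : List Char) (acc : List Char) :
    l.foldl (fun acc c =>
        if PySem.Chars.isalnum c then acc ++ [PySem.Chars.lowerChar c]
        else if [' ', '-', '_', '/'].contains c then acc ++ ['-']
        else acc) acc = acc ++ l.filterMap pvClassify := by
  induction l generalizing acc with
  | nil => simp
  | cons c t ih =>
    simp only [List.foldl_cons, List.filterMap_cons]
    by_cases h1 : PySem.Chars.isalnum c = true
    · have hcl : pvClassify c = some (PySem.Chars.lowerChar c) := by
        unfold pvClassify; rw [if_pos h1]
      rw [if_pos h1, hcl, ih, List.append_assoc]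
      rfl
    · by_cases h2 : [' ', '-', '_', '/'].contains c = true
      · have hcl : pvClassify c = some '-' := by
          unfold pvClassify; rw [if_neg h1, if_pos h2]
        rw [if_neg h1, if_pos h2, hcl, ih, List.append_assoc]
        rfl
      · have hcl : pvClassify c = none := by
          unfold pvClassify; rw [if_neg h1, if_neg h2]
        rw [if_neg h1, if_neg h2, hcl, ih]

theorem pv_foldB (l : List Char) : ∀ (acc : List Char) (prev : Char),
    (l.foldl (fun (p : List Char × Char) c =>
        if PySem.Chars.isalnum c then (p.1 ++ [PySem.Chars.lowerChar c], PySem.Chars.lowerChar c)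
        else if [' ', '-', '_', '/'].contains c && p.2 != '-' then (p.1 ++ ['-'], '-')
        else p) (acc, prev)).1 = acc ++ pvBody (prev = '-') (l.filterMap pvClassify)
    ∧ (((l.foldl (fun (p : List Char × Char) c =>
        if PySem.Chars.isalnum c then (p.1 ++ [PySem.Chars.lowerChar c], PySem.Chars.lowerChar c)
        else if [' ', '-', '_', '/'].contains c && p.2 != '-' then (p.1 ++ ['-'], '-')
        else p) (acc, prev)).2 = '-') ↔ pvPA (prev = '-') (l.filterMap pvClassify) = true) := by
  induction l with
  | nil => intro acc prev; simp [pvBody, pvPA]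
  | cons c t ih =>
    intro acc prev
    simp only [List.foldl_cons, List.filterMap_cons]
    by_cases h1 : PySem.Chars.isalnum c = true
    · have hne := pv_lower_ne_dash c h1
      have hcl : pvClassify c = some (PySem.Chars.lowerChar c) := by
        unfold pvClassify; rw [if_pos h1]
      rw [if_pos h1, hcl]
      obtain ⟨ih1, ih2⟩ := ih (acc ++ [PySem.Chars.lowerChar c]) (PySem.Chars.lowerChar c)
      constructor
      · rw [ih1, List.append_assoc]
        show _ = acc ++ pvBody _ (PySem.Chars.lowerChar c :: List.filterMap pvClassify t)
        simp [pvBody, hne]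
      · rw [ih2]
        show _ ↔ pvPA _ (PySem.Chars.lowerChar c :: List.filterMap pvClassify t) = true
        simp [pvPA, hne]
    · by_cases h2 : [' ', '-', '_', '/'].contains c = true
      · have hcl : pvClassify c = some '-' := by
          unfold pvClassify; rw [if_neg h1, if_pos h2]
        rw [if_neg h1, hcl]
        by_cases h3 : prev = '-'
        · have hc : ([' ', '-', '_', '/'].contains c && prev != '-') = false := by
            rw [h2, Bool.true_and]; simp [h3]
          rw [hc, if_neg (by simp)]
          obtain ⟨ih1, ih2⟩ := ih acc prev
          constructor
          · rw [ih1]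
            show _ = acc ++ pvBody _ ('-' :: List.filterMap pvClassify t)
            simp [pvBody, h3]
          · rw [ih2, h3]
            simp [pvPA]
        · have hc : ([' ', '-', '_', '/'].contains c && prev != '-') = true := by
            rw [h2, Bool.true_and]; simp [h3]
          rw [hc, if_pos rfl]
          obtain ⟨ih1, ih2⟩ := ih (acc ++ ['-']) '-'
          constructor
          · rw [ih1, List.append_assoc]
            show _ = acc ++ pvBody _ ('-' :: List.filterMap pvClassify t)
            simp [pvBody, h3]
          · rw [ih2]
            show _ ↔ pvPA _ ('-' :: List.filterMap pvClassify t) = true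
            simp [pvPA]
      · have hcl : pvClassify c = none := by
          unfold pvClassify; rw [if_neg h1, if_neg h2]
        rw [if_neg h1, hcl]
        have h2f : [' ', '-', '_', '/'].contains c = false := by
          cases hb : [' ', '-', '_', '/'].contains c
          · rfl
          · exact absurd hb h2
        have hc : ([' ', '-', '_', '/'].contains c && prev != '-') = false := by
          rw [h2f, Bool.false_and]
        rw [hc, if_neg (by simp)]
        exact ih acc prev

theorem pv_go (fuel : Nat) : ∀ (l acc : List Char), l.length ≤ fuel →
    PySem.Chars.replace.go ['-', '-'] ['-'] fuel l acc = acc.reverse ++ pvRep l := by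
  induction fuel with
  | zero =>
    intro l acc h
    have hl : l = [] := List.eq_nil_of_length_eq_zero (Nat.le_zero.mp h)
    subst hl
    simp [PySem.Chars.replace.go, pvRep]
  | succ fuel ihf =>
    intro l acc h
    cases l with
    | nil => simp [PySem.Chars.replace.go, pvRep]
    | cons c t =>
      rw [PySem.Chars.replace.go]
      by_cases hp : List.isPrefixOf ['-', '-'] (c :: t) = true
      · rw [if_pos hp]
        rcases t with _ | ⟨d, u⟩
        · simp [List.isPrefixOf] at hp
        · have hc : c = '-' ∧ d = '-' := by
            simp [List.isPrefixOf] at hp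
            exact ⟨hp.1.symm, hp.2.symm⟩
          obtain ⟨hc1, hc2⟩ := hc
          subst hc1; subst hc2
          simp only [List.length_cons] at h
          rw [show List.drop (['-', '-'] : List Char).length ('-' :: '-' :: u) = u from rfl]
          rw [ihf u (['-'].reverse ++ acc) (by omega)]
          simp [pvRep]
      · rw [if_neg hp]
        simp only [List.length_cons] at h
        rw [ihf t (c :: acc) (by omega)]
        have hr : pvRep (c :: t) = c :: pvRep t := by
          rcases t with _ | ⟨d, u⟩
          · simp [pvRep]
          · have : ¬ (c = '-' ∧ d = '-') := by
              intro ⟨e1, e2⟩; subst e1; subst e2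
              simp [List.isPrefixOf] at hp
            simp [pvRep, this]
        rw [hr]
        simp

theorem pv_replace_eq_rep (s : List Char) :
    PySem.Chars.replace s ['-', '-'] ['-'] = pvRep s := by
  unfold PySem.Chars.replace
  rw [if_neg (by simp)]
  rw [pv_go s.length s [] (le_refl _)]
  simp

theorem pv_dd_infix_cons (c1 c2 : Char) (t : List Char) :
    (['-', '-'] <:+: (c1 :: c2 :: t)) ↔ ((c1 = '-' ∧ c2 = '-') ∨ ['-', '-'] <:+: (c2 :: t)) := by
  rw [List.infix_cons_iff, List.cons_prefix_cons, List.cons_prefix_cons]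
  constructor
  · rintro (⟨e1, e2, -⟩ | h)
    · exact Or.inl ⟨e1.symm, e2.symm⟩
    · exact Or.inr h
  · rintro (⟨e1, e2⟩ | h)
    · exact Or.inl ⟨e1.symm, e2.symm, List.nil_prefix⟩
    · exact Or.inr h

theorem pv_rep_head (s : List Char) : (pvRep s).head? = s.head? := by
  induction s using pvRep.induct with
  | case1 => simp [pvRep]
  | case2 c => simp [pvRep]
  | case3 c1 c2 t h ih =>
    obtain ⟨e1, e2⟩ := h
    subst e1; subst e2
    simp [pvRep]
  | case4 c1 c2 t h ih =>
    simp [pvRep, h]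

theorem pv_rep_len_le (s : List Char) : (pvRep s).length ≤ s.length := by
  induction s using pvRep.induct with
  | case1 => simp [pvRep]
  | case2 c => simp [pvRep]
  | case3 c1 c2 t h ih =>
    simp only [pvRep, if_pos h, List.length_cons]
    omega
  | case4 c1 c2 t h ih =>
    simp only [pvRep, if_neg h, List.length_cons]
    simp only [List.length_cons] at ih
    omega

theorem pv_rep_len_lt (s : List Char) (h : ['-', '-'] <:+: s) : (pvRep s).length < s.length := by
  induction s using pvRep.induct with
  | case1 => exact absurd (List.IsInfix.length_le h) (by simp)
  | case2 c => exact absurd (List.IsInfix.length_le h) (by simp)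
  | case3 c1 c2 t hc ih =>
    simp only [pvRep, if_pos hc, List.length_cons]
    have := pv_rep_len_le t
    omega
  | case4 c1 c2 t hc ih =>
    have h2 : ['-', '-'] <:+: (c2 :: t) := by
      rcases (pv_dd_infix_cons c1 c2 t).mp h with h' | h'
      · exact absurd h' hc
      · exact h'
    have h3 := ih h2
    simp only [pvRep, if_neg hc, List.length_cons]
    simp only [List.length_cons] at h3
    omega

theorem pv_col_cons (a : Char) (x : List Char) (h : a ≠ '-') :
    pvCol (a :: x) = a :: pvCol x := by
  cases x with
  | nil => simp [pvCol]
  | cons b y => simp [pvCol, h]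

theorem pv_col_rep (s : List Char) : pvCol (pvRep s) = pvCol s := by
  induction s using pvRep.induct with
  | case1 => simp [pvRep]
  | case2 c => simp [pvRep]
  | case3 c1 c2 t hc ih =>
    obtain ⟨e1, e2⟩ := hc
    subst e1; subst e2
    have hrw : pvRep ('-' :: '-' :: t) = '-' :: pvRep t := by simp [pvRep]
    have hrhs : pvCol ('-' :: '-' :: t) = pvCol ('-' :: t) := by simp [pvCol]
    rw [hrw, hrhs]
    rcases t with _ | ⟨d, u⟩
    · decide
    · have hh : (pvRep (d :: u)).head? = (d :: u).head? := pv_rep_head (d :: u)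
      rcases hrep : pvRep (d :: u) with _ | ⟨d', v⟩
      · rw [hrep] at hh; simp at hh
      · have hd : d = d' := by
          rw [hrep] at hh; simp at hh; exact hh.symm
        subst hd
        rw [hrep] at ih
        by_cases hdd : d = '-'
        · subst hdd
          have l1 : pvCol ('-' :: '-' :: v) = pvCol ('-' :: v) := by simp [pvCol]
          have l2 : pvCol ('-' :: '-' :: u) = pvCol ('-' :: u) := by simp [pvCol]
          rw [l1, l2, ih]
        · have g1 : pvCol ('-' :: d :: v) = '-' :: pvCol (d :: v) := by
            simp only [pvCol]
            rw [if_neg (by exact fun h => hdd h.2)]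
          have g2 : pvCol ('-' :: d :: u) = '-' :: pvCol (d :: u) := by
            simp only [pvCol]
            rw [if_neg (by exact fun h => hdd h.2)]
          rw [g1, g2, ih]
  | case4 c1 c2 t hc ih =>
    have hrw : pvRep (c1 :: c2 :: t) = c1 :: pvRep (c2 :: t) := by
      simp only [pvRep]
      rw [if_neg hc]
    rw [hrw]
    have hh : (pvRep (c2 :: t)).head? = (c2 :: t).head? := pv_rep_head (c2 :: t)
    rcases hrep : pvRep (c2 :: t) with _ | ⟨d', v⟩
    · rw [hrep] at hh; simp at hh
    · have hd : c2 = d' := by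
        rw [hrep] at hh; simp at hh; exact hh.symm
      subst hd
      have g1 : pvCol (c1 :: c2 :: v) = c1 :: pvCol (c2 :: v) := by
        simp only [pvCol]
        rw [if_neg hc]
      have g2 : pvCol (c1 :: c2 :: t) = c1 :: pvCol (c2 :: t) := by
        simp only [pvCol]
        rw [if_neg hc]
      rw [g1, g2, ← hrep, ih]

theorem pv_col_fix (s : List Char) (h : ¬ ['-', '-'] <:+: s) : pvCol s = s := by
  induction s using pvCol.induct with
  | case1 => simp [pvCol]
  | case2 c => simp [pvCol]
  | case3 c1 c2 t hc ih =>
    exact absurd ((pv_dd_infix_cons c1 c2 t).mpr (Or.inl hc)) h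
  | case4 c1 c2 t hc ih =>
    have h2 : ¬ ['-', '-'] <:+: (c2 :: t) := fun h' =>
      h ((pv_dd_infix_cons c1 c2 t).mpr (Or.inr h'))
    simp only [pvCol, if_neg hc]
    rw [ih h2]

theorem pv_loop_eq_col (fuel : Nat) (s : List Char) (h : s.length ≤ fuel) :
    pvSlugLoop fuel s = pvCol s := by
  induction fuel generalizing s with
  | zero =>
    have hl : s = [] := List.eq_nil_of_length_eq_zero (Nat.le_zero.mp h)
    subst hl
    simp [pvSlugLoop, pvCol]
  | succ fuel ih =>
    rw [pvSlugLoop]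
    by_cases hin : PySem.Chars.isIn ['-', '-'] s = true
    · rw [if_pos hin, pv_replace_eq_rep]
      have hinf := (PySem.Chars.isIn_iff_infix _ _).mp hin
      have hlt := pv_rep_len_lt s hinf
      rw [ih (pvRep s) (by omega)]
      exact pv_col_rep s
    · rw [if_neg hin]
      exact (pv_col_fix s (fun hinf => hin ((PySem.Chars.isIn_iff_infix _ _).mpr hinf))).symm

theorem pv_body_ne_nil (c : Char) (t : List Char) : pvBody false (c :: t) ≠ [] := by
  by_cases hc : c = '-'
  · subst hc; simp [pvBody]
  · simp [pvBody, hc]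

theorem pv_pa_body_ne (u : List Char) (h : pvPA false u = true) : pvBody false u ≠ [] := by
  cases u with
  | nil => simp [pvPA] at h
  | cons c t => exact pv_body_ne_nil c t

theorem pv_body_true (l : List Char) :
    pvBody true l = pvBody false (l.dropWhile (fun c => c == '-')) := by
  induction l with
  | nil => rfl
  | cons c t ih =>
    by_cases hc : c = '-'
    · subst hc
      simp [pvBody, ih]
    · simp [pvBody, hc]

theorem pv_pa_append (l1 : List Char) : ∀ (pd : Bool) (l2 : List Char),
    pvPA pd (l1 ++ l2) = pvPA (pvPA pd l1) l2 := by
  induction l1 with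
  | nil => intro pd l2; rfl
  | cons c t ih => intro pd l2; simp only [List.cons_append, pvPA]; exact ih _ l2

theorem pv_pa_indep (pd pd' : Bool) (l : List Char) (h : l ≠ []) : pvPA pd l = pvPA pd' l := by
  cases l with
  | nil => exact absurd rfl h
  | cons c t => rfl

theorem pv_pa_all_dash (l : List Char) (h : ∀ c ∈ l, c = '-') : pvPA true l = true := by
  induction l with
  | nil => rfl
  | cons c t ih =>
    have hc : c = '-' := h c (by simp)
    subst hc
    simp only [pvPA]
    exact ih (fun c hc => h c (by simp [hc]))

theorem pv_body_all_dash (l : List Char) (h : ∀ c ∈ l, c = '-') : pvBody true l = [] := by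
  induction l with
  | nil => rfl
  | cons c t ih =>
    have hc : c = '-' := h c (by simp)
    subst hc
    simp only [pvBody, if_true]
    exact ih (fun c hc => h c (by simp [hc]))

theorem pv_dropWhile_head (p : Char → Bool) (l : List Char) (b : Char) (y : List Char)
    (h : List.dropWhile p l = b :: y) : p b = false := by
  have hh := List.head?_dropWhile_not p l
  rw [h] at hh
  simpa using hh

theorem pv_rstrip_cons (b : Char) (y : List Char) (hb : b ≠ '-') :
    (List.dropWhile (fun c => c == '-') ((b :: y).reverse)).reverse
      = b :: (List.dropWhile (fun c => c == '-') y.reverse).reverse := by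
  rw [List.reverse_cons, List.dropWhile_append]
  split_ifs with hE
  · rw [List.isEmpty_iff] at hE
    have hone : List.dropWhile (fun c => c == '-') [b] = [b] := by
      simp [hb]
    rw [hone, hE]
    simp
  · simp [List.reverse_append]

theorem pv_rstrip_pre (pre : List Char) (b : Char) (hb : b ≠ '-') (y : List Char) :
    (List.dropWhile (fun c => c == '-') ((pre ++ (b :: y)).reverse)).reverse
      = pre ++ b :: (List.dropWhile (fun c => c == '-') y.reverse).reverse := by
  rw [List.reverse_append, List.dropWhile_append]
  have h1 := pv_rstrip_cons b y hb
  split_ifs with hE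
  · exfalso
    rw [List.isEmpty_iff] at hE
    rw [hE] at h1
    simp at h1
  · rw [List.reverse_append, List.reverse_reverse, h1]

theorem pv_col_dashrun (w : List Char) (hw : ∀ c ∈ w, c = '-') (b : Char) (hb : b ≠ '-')
    (z : List Char) : pvCol (('-' :: w) ++ (b :: z)) = '-' :: pvCol (b :: z) := by
  induction w with
  | nil =>
    simp only [List.cons_append, List.nil_append, pvCol]
    rw [if_neg (show ¬(True ∧ b = '-') from fun h => hb h.2)]
  | cons c w ih =>
    have hc : c = '-' := hw c (by simp)
    subst hc
    have e : pvCol ('-' :: '-' :: (w ++ (b :: z))) = pvCol ('-' :: (w ++ (b :: z))) := by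
      simp [pvCol]
    simp only [List.cons_append] at e ⊢
    rw [e]
    have := ih (fun c hc => hw c (by simp [hc]))
    simpa using this

theorem pv_M_aux (n : Nat) : ∀ (t : List Char), t.length ≤ n →
    pvCol ((List.dropWhile (fun c => c == '-') t.reverse).reverse)
      = if pvPA false t then (pvBody false t).dropLast else pvBody false t := by
  induction n with
  | zero =>
    intro t h
    have hl : t = [] := List.eq_nil_of_length_eq_zero (Nat.le_zero.mp h)
    subst hl
    simp [pvPA, pvBody, pvCol]
  | succ n ih =>
    intro t hlen
    cases t with
    | nil => simp [pvPA, pvBody, pvCol]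
    | cons a u =>
      by_cases ha : a = '-'
      · subst ha
        rcases hdw : List.dropWhile (fun c => c == '-') u with _ | ⟨b, y⟩
        · have hall : ∀ c ∈ u, c = '-' := by
            intro c hc
            have := List.dropWhile_eq_nil_iff.mp hdw c hc
            simpa using this
          have h1 : List.dropWhile (fun c => c == '-') ('-' :: u).reverse = [] := by
            rw [List.dropWhile_eq_nil_iff]
            intro x hx
            simp only [List.mem_reverse] at hx
            rcases List.mem_cons.mp hx with h | h
            · simp [h]
            · simp [hall x h]
          rw [h1]
          have hpa : pvPA false ('-' :: u) = true := by
            have e : pvPA false ('-' :: u) = pvPA true u := rfl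
            rw [e]
            exact pv_pa_all_dash u hall
          have hb : pvBody true u = [] := pv_body_all_dash u hall
          rw [if_pos hpa]
          have e2 : pvBody false ('-' :: u) = '-' :: pvBody true u := by simp [pvBody]
          rw [e2, hb]
          simp [pvCol]
        · have hbne : b ≠ '-' := by
            have := pv_dropWhile_head _ u b y hdw
            simpa using this
          have hw : ∀ c ∈ List.takeWhile (fun c => c == '-') u, c = '-' := by
            intro c hc
            simpa using List.mem_takeWhile_imp hc
          have hu : u = List.takeWhile (fun c => c == '-') u ++ (b :: y) := by
            conv_lhs => rw [← List.takeWhile_append_dropWhile (p := fun c => c == '-') (l := u)]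
            rw [hdw]
          have hsplit : ('-' :: u) = (('-' :: List.takeWhile (fun c => c == '-') u) ++ (b :: y)) := by
            conv_lhs => rw [hu]
            rfl
          rw [hsplit, pv_rstrip_pre _ b hbne y, pv_col_dashrun _ hw b hbne _,
            ← pv_rstrip_cons b y hbne]
          have hlen2 : (b :: y).length ≤ n := by
            have h1 : (b :: y).length ≤ u.length := by
              conv_rhs => rw [hu]
              simp
            simp only [List.length_cons] at hlen h1 ⊢
            omega
          rw [ih (b :: y) hlen2, ← hsplit]
          have hbody : pvBody false ('-' :: u) = '-' :: pvBody false (b :: y) := by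
            have e1 : pvBody false ('-' :: u) = '-' :: pvBody true u := by simp [pvBody]
            rw [e1, pv_body_true u, hdw]
          have hpa2 : pvPA false ('-' :: u) = pvPA false (b :: y) := by
            have e1 : pvPA false ('-' :: u) = pvPA true u := rfl
            rw [e1]
            conv_lhs => rw [hu]
            rw [pv_pa_append]
            exact pv_pa_indep _ _ _ (by simp)
          rw [hbody, hpa2]
          by_cases hp : pvPA false (b :: y) = true
          · rw [if_pos hp, if_pos hp, List.dropLast_cons_of_ne_nil (pv_body_ne_nil b y)]
          · rw [if_neg hp, if_neg hp]
      · have ihu := ih u (by simp only [List.length_cons] at hlen; omega)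
        rw [pv_rstrip_cons a u ha, pv_col_cons a _ ha, ihu]
        have e1 : pvBody false (a :: u) = a :: pvBody false u := by simp [pvBody, ha]
        have e2 : pvPA false (a :: u) = pvPA false u := by simp [pvPA, ha]
        rw [e1, e2]
        by_cases hp : pvPA false u = true
        · rw [if_pos hp, if_pos hp, List.dropLast_cons_of_ne_nil (pv_pa_body_ne u hp)]
        · rw [if_neg hp, if_neg hp]

theorem pv_M (t : List Char) :
    pvCol ((List.dropWhile (fun c => c == '-') t.reverse).reverse)
      = if pvPA false t then (pvBody false t).dropLast else pvBody false t :=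
  pv_M_aux t.length t (le_refl _)

theorem pv_TOP (m : List Char) :
    pvCol (PySem.Chars.stripChars m ['-'])
      = if pvPA true m then (pvBody true m).dropLast else pvBody true m := by
  have hstrip : PySem.Chars.stripChars m ['-']
      = (List.dropWhile (fun c => c == '-')
          ((List.dropWhile (fun c => c == '-') m).reverse)).reverse := by
    unfold PySem.Chars.stripChars
    have hfun : (fun c => List.contains ['-'] c) = (fun c => c == '-') := by
      funext c
      by_cases h : c = '-' <;> simp [h]
    rw [hfun]
  rw [hstrip]
  rcases hdw : List.dropWhile (fun c => c == '-') m with _ | ⟨b, y⟩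
  · have hb : pvBody true m = [] := by rw [pv_body_true m, hdw]; rfl
    simp [hb, pvCol]
  · rw [pv_M (b :: y)]
    have hbne : b ≠ '-' := by
      have := pv_dropWhile_head _ m b y hdw
      simpa using this
    have hu : m = List.takeWhile (fun c => c == '-') m ++ (b :: y) := by
      conv_lhs => rw [← List.takeWhile_append_dropWhile (p := fun c => c == '-') (l := m)]
      rw [hdw]
    have hbody : pvBody true m = pvBody false (b :: y) := by rw [pv_body_true m, hdw]
    have hpa : pvPA true m = pvPA false (b :: y) := by
      conv_lhs => rw [hu]
      rw [pv_pa_append]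
      exact pv_pa_indep _ _ _ (by simp)
    rw [hbody, hpa]

-- ===== VERDICT (by name: the statement is the Claim_ definition above) =====
theorem slugify_category_py_spec : Claim_equal_slugify_category_py := by
  unfold Claim_equal_slugify_category_py
  intro value _
  unfold Spec_slugify_category_py
  cases value with
  | none => rfl
  | some s =>
    show slugify_category_py (some s) = slugify_category_py_alt (some s)
    unfold slugify_category_py slugify_category_py_alt
    by_cases h : s.toList.isEmpty = true
    · simp [h]
    · simp only [h]
      rw [pv_foldA s.toList []]
      obtain ⟨hb1, hb2⟩ := pv_foldB s.toList [] '-'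
      rw [hb1]
      have hd : (decide (('-' : Char) = '-')) = true := by decide
      rw [hd] at hb2
      simp only [List.nil_append, Bool.false_eq_true, if_false]
      simp only [show (decide True) = true from rfl]
      rw [pv_loop_eq_col _ _ (le_refl _), pv_TOP (s.toList.filterMap pvClassify)]
      congr 1
      by_cases hpa : pvPA true (s.toList.filterMap pvClassify) = true
      · rw [if_pos hpa]
        have hs2 := hb2.mpr hpa
        by_cases hnil : pvBody true (s.toList.filterMap pvClassify) = []
        · rw [if_neg (fun hcond => hcond.2 hnil), hnil]
          simp
        · rw [if_pos ⟨hs2, hnil⟩]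
      · rw [if_neg hpa, if_neg (fun hcond => hpa (hb2.mp hcond.1))]
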